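-- pv_equiv track=rewrite | github.com/errol1swaby2-bit/WeAll-Protocol | Weall-Protocol/src/weall/runtime/chain_config.py | _urls_have_no_duplicates
-- ===== SOURCE A (Python) =====
-- def _urls_have_no_duplicates(urls: list[str]) -> bool:
--     seen: set[str] = set()
--     for raw in urls:
--         normalized = str(raw).strip().rstrip("/").lower()
--         if not normalized:
--             return False
--         if normalized in seen:
--             return False
--         seen.add(normalized)
--     return True
-- ===== SOURCE B (Python) =====
-- def _urls_have_no_duplicates(urls: list[str]) -> bool:
--     # Sort the normalized URLs, then a single adjacent scan: every entry must be
--     # non-empty and strictly smaller than its successor (strict order = no duplicates).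
--     ns = sorted(str(u).strip().rstrip("/").lower() for u in urls)
--     return all(ns) and all(x < y for x, y in zip(ns, ns[1:]))
-- ===== Notes on version B (the rewrite author's own statement) =====
-- stated objective: alternative
-- what changed: Replaces A's one-pass early-exit loop over a hash set with sort-then-adjacent-scan: normalize all URLs, sort them, and check every element is non-empty and strictly less than its successor (strict ascending order on the sorted list is exactly 'no duplicates').
import Mathlib
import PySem

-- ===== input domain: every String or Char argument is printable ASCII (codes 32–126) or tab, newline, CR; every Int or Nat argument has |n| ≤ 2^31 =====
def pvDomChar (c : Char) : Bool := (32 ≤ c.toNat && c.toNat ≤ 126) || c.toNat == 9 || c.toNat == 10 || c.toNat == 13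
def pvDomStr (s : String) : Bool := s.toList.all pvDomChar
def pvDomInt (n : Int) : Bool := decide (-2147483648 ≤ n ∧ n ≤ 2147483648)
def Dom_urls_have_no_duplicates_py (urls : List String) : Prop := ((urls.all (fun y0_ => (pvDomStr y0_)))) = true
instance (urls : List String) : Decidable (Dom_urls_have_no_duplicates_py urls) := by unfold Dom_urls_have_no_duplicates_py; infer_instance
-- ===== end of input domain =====

-- B replaces A's early-exit loop over a 'seen' set by sort-then-adjacent-scan (strictly ascending
-- sorted list = no duplicates); objective: alternative algorithm, same results.

-- ===== PORT A =====
-- str(raw).strip().rstrip("/").lower() — rstrip("/") ported by hand (PySem has no rstrip-with-chars):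
-- drop trailing '/' characters; exact for Python's s.rstrip("/").
def pvRstripSlash (cs : List Char) : List Char := (cs.reverse.dropWhile (fun c => c = '/')).reverse

def pvNormalize (raw : String) : List Char :=
  PySem.Chars.lower (pvRstripSlash (PySem.Chars.strip raw.toList))

def pvALoop : List String → PySem.Set (List Char) → Bool
  | [], _ => true
  | raw :: rest, seen =>
    let normalized := pvNormalize raw
    if normalized = [] then false
    else if PySem.Set.contains seen normalized then false
    else pvALoop rest (PySem.Set.add seen normalized)

def urls_have_no_duplicates_py (urls : List String) : Bool :=
  pvALoop urls PySem.Set.empty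

-- ===== PORT B =====
-- ns = sorted(normalized); return all(ns) and all(x < y for x, y in zip(ns, ns[1:]))
def urls_have_no_duplicates_py_alt (urls : List String) : Bool :=
  let ns := PySem.List.sorted (urls.map (fun u => String.ofList (pvNormalize u))) (fun x => x) false
  ns.all (fun s => decide (s ≠ "")) && (ns.zip ns.tail).all (fun p => decide (p.1 < p.2))

-- ===== PRECONDITION & SPEC =====
def Spec_urls_have_no_duplicates_py (urls : List String) (out : Bool) : Prop := out = urls_have_no_duplicates_py_alt urls
instance (urls : List String) (out : Bool) : Decidable (Spec_urls_have_no_duplicates_py urls out) := by unfold Spec_urls_have_no_duplicates_py; infer_instance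

-- ===== CLAIM (what is proved, stated in full; the proofs are below) =====
def Claim_equal_urls_have_no_duplicates_py : Prop := ∀ (urls : List String), Dom_urls_have_no_duplicates_py urls → Spec_urls_have_no_duplicates_py urls (urls_have_no_duplicates_py urls)

-- ===== LEMMAS AND PROOFS =====

lemma pvALoop_true_iff (urls : List String) (seen : PySem.Set (List Char)) :
    pvALoop urls seen = true ↔
      ([] ∉ urls.map pvNormalize ∧ (urls.map pvNormalize).Nodup ∧
        ∀ x ∈ urls.map pvNormalize, x ∉ seen) := by
  induction urls generalizing seen with
  | nil => simp [pvALoop]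
  | cons raw rest ih =>
    simp only [pvALoop, List.map_cons, List.mem_cons, List.nodup_cons]
    split_ifs with hemp hseen
    · simp [hemp]
    · rw [PySem.Set.contains_iff] at hseen
      simp only [false_iff]
      intro ⟨_, _, hall⟩
      exact hall _ (Or.inl rfl) hseen
    · rw [ih]
      constructor
      · rintro ⟨h1, h2, h3⟩
        refine ⟨?_, ⟨fun hmem => ?_, h2⟩, ?_⟩
        · rintro (h | h)
          · exact hemp h.symm
          · exact h1 h
        · exact (h3 _ hmem ((PySem.Set.mem_add seen _ _).mpr (Or.inr rfl))).elim
        · rintro x (rfl | hx)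
          · simpa using hseen
          · intro hxs
            exact h3 x hx ((PySem.Set.mem_add seen _ _).mpr (Or.inl hxs))
      · rintro ⟨hor, ⟨hnin, h2⟩, h3⟩
        refine ⟨fun h => hor (Or.inr h), h2, fun x hx hxadd => ?_⟩
        rcases (PySem.Set.mem_add seen _ _).mp hxadd with hxs | rfl
        · exact h3 x (Or.inr hx) hxs
        · exact hnin hx

lemma pvAdjAll_iff_isChain (l : List String) :
    ((l.zip l.tail).all (fun p => decide (p.1 < p.2))) = true ↔ l.IsChain (· < ·) := by
  induction l with
  | nil => simp
  | cons a t ih =>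
    cases t with
    | nil => simp
    | cons b u => simp_all [List.isChain_cons_cons]

lemma pvAlt_true_iff (urls : List String) :
    urls_have_no_duplicates_py_alt urls = true ↔
      ([] ∉ urls.map pvNormalize ∧ (urls.map pvNormalize).Nodup) := by
  unfold urls_have_no_duplicates_py_alt
  have hmkinj : Function.Injective String.ofList := fun a b h => by
    have := congrArg String.toList h
    simpa using this
  set M := urls.map (fun u => String.ofList (pvNormalize u)) with hM
  have hMeq : M = (urls.map pvNormalize).map String.ofList := by
    simp [hM, List.map_map]
  have hperm : (PySem.List.sorted M (fun x => x) false).Perm M := PySem.List.sorted_perm _ _ _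
  rw [Bool.and_eq_true, pvAdjAll_iff_isChain, List.isChain_iff_pairwise]
  simp only [List.all_eq_true, decide_eq_true_eq]
  constructor
  · rintro ⟨hne, hchain⟩
    have hnd : (PySem.List.sorted M (fun x => x) false).Nodup :=
      List.Pairwise.imp ne_of_lt hchain
    have hMnd : M.Nodup := hperm.nodup_iff.mp hnd
    have hmem : "" ∉ M := fun h => hne "" (hperm.mem_iff.mpr h) rfl
    constructor
    · intro h
      exact hmem (by rw [hMeq]; exact List.mem_map_of_mem h)
    · rw [hMeq] at hMnd
      exact (List.nodup_map_iff hmkinj).mp hMnd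
  · rintro ⟨hne, hnd⟩
    have hMnd : M.Nodup := by
      rw [hMeq]; exact (List.nodup_map_iff hmkinj).mpr hnd
    refine ⟨?_, ?_⟩
    · intro s hs h
      subst h
      have : "" ∈ M := hperm.mem_iff.mp hs
      rw [hMeq] at this
      rcases List.mem_map.mp this with ⟨cs, hcs, hcse⟩
      have hcn : cs = [] := by
        have := congrArg String.toList hcse
        simpa using this
      exact hne (hcn ▸ hcs)
    · have hle : (PySem.List.sorted M (fun x => x) false).Pairwise (· ≤ ·) := by
        have := PySem.List.sorted_pairwise (xs := M) (key := fun x => x)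
        simpa using this
      have hnd' : (PySem.List.sorted M (fun x => x) false).Nodup := hperm.nodup_iff.mpr hMnd
      exact (hle.and hnd').imp (fun h => lt_of_le_of_ne h.1 h.2)

-- ===== VERDICT (by name: the statement is the Claim_ definition above) =====
theorem urls_have_no_duplicates_py_spec : Claim_equal_urls_have_no_duplicates_py := by
  intro urls _
  unfold Spec_urls_have_no_duplicates_py urls_have_no_duplicates_py
  rw [Bool.eq_iff_iff, pvALoop_true_iff, pvAlt_true_iff]
  constructor
  · rintro ⟨h1, h2, _⟩; exact ⟨h1, h2⟩
  · rintro ⟨h1, h2⟩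
    exact ⟨h1, h2, fun x _ hx => by simp [PySem.Set.empty_eq] at hx⟩
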